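-- pv_equiv track=rewrite | github.com/debilitatingfatigue/code_examples | algorithms/# тест.py | min_time_to_copy
-- ===== SOURCE A (Python) =====
-- def is_possible(n, x, y, mid):
--     return (mid // x) + (mid // y) >= n
--
-- def min_time_to_copy(n, x, y):
--     left, right = 0, n * min(x, y)
--
--     while left < right:
--         mid = (left + right) // 2
--         if is_possible(n, x, y, mid):
--             right = mid
--         else:
--             left = mid + 1
--
--     return left
-- ===== SOURCE B (Python) =====
-- def min_time_to_copy(n, x, y):
--     # Closed form: the optimal schedule gives a copies to the x-machine and
--     # n-a to the y-machine; cost max(a*x, (n-a)*y) is quasi-convex in a, so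
--     # the minimum is at floor(n*y/(x+y)) or the next integer.
--     if n * min(x, y) <= 0:
--         return 0
--     a = n * y // (x + y)
--     return min(max(a * x, (n - a) * y), max((a + 1) * x, (n - a - 1) * y))
-- ===== Notes on version B (the rewrite author's own statement) =====
-- stated objective: faster
-- what changed: Replaces A's binary search over completion time by an O(1) closed form: the optimum gives a copies to the x-machine and n-a to the y-machine, cost max(a*x,(n-a)*y) is quasi-convex in a, so only a=floor(n*y/(x+y)) and a+1 need evaluating (keeping A's clamp-to-0 guard for non-positive n*min(x,y)).
-- outside the precondition, e.g. on min_time_to_copy(-9, -3, -5): A returns 45, B returns 18; on min_time_to_copy(-4, -3, 0): A raises ZeroDivisionError, B returns 0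
import Mathlib
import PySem

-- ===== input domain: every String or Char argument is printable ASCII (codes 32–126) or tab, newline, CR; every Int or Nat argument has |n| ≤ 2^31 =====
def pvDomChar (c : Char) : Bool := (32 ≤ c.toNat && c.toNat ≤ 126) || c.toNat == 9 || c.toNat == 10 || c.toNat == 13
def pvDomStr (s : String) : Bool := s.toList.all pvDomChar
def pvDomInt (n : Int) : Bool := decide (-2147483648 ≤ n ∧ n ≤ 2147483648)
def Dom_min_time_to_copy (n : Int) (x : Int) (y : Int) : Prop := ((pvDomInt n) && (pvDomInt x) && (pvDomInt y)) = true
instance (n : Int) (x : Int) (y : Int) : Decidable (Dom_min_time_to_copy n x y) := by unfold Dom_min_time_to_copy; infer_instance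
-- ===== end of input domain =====

-- B replaces A's binary search over time by an O(1) closed form: the optimum assigns a copies
-- to the x-machine and n-a to the y-machine, and max(a*x,(n-a)*y) is minimized at
-- floor(n*y/(x+y)) or the next integer.


-- ===== PORT A =====
def is_possible (n x y mid : Int) : Bool :=
  decide (PySem.Int.floordiv mid x + PySem.Int.floordiv mid y ≥ n)

-- the `while left < right` loop of A; the Nat fuel (= right - left at entry, an upper bound
-- on the number of iterations, since each step shrinks the interval) only makes it total
def bsearchLoop (n x y : Int) : Nat → Int → Int → Int
  | 0, left, _ => left
  | fuel + 1, left, right =>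
    if left < right then
      let mid := PySem.Int.floordiv (left + right) 2
      if is_possible n x y mid then
        bsearchLoop n x y fuel left mid
      else
        bsearchLoop n x y fuel (mid + 1) right
    else left

def min_time_to_copy (n : Int) (x : Int) (y : Int) : Int :=
  bsearchLoop n x y (n * min x y).toNat 0 (n * min x y)

-- ===== PORT B =====
def min_time_to_copy_alt (n : Int) (x : Int) (y : Int) : Int :=
  if n * min x y ≤ 0 then 0
  else
    let a := PySem.Int.floordiv (n * y) (x + y)
    min (max (a * x) ((n - a) * y)) (max ((a + 1) * x) ((n - a - 1) * y))

-- ===== PRECONDITION & SPEC =====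
-- Pre_ excludes inputs with n < 0 and a negative x or y: there the loop runs with negative
-- divisors, so A raises ZeroDivisionError when the other copier time is 0 and otherwise
-- returns an accidental value of binary search on a non-monotone predicate.
def Pre_min_time_to_copy (n : Int) (x : Int) (y : Int) : Prop :=
  0 ≤ n ∨ (0 ≤ x ∧ 0 ≤ y)
instance (n : Int) (x : Int) (y : Int) : Decidable (Pre_min_time_to_copy n x y) := by
  unfold Pre_min_time_to_copy; infer_instance

def pvWitness_min_time_to_copy : Int × Int × Int := (4, 2, 3)

def Spec_min_time_to_copy (n : Int) (x : Int) (y : Int) (out : Int) : Prop :=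
  out = min_time_to_copy_alt n x y
instance (n : Int) (x : Int) (y : Int) (out : Int) : Decidable (Spec_min_time_to_copy n x y out) := by
  unfold Spec_min_time_to_copy; infer_instance

-- ===== CLAIM (what is proved, stated in full; the proofs are below) =====
def Claim_equal_min_time_to_copy : Prop := ∀ (n : Int) (x : Int) (y : Int), Dom_min_time_to_copy n x y → Pre_min_time_to_copy n x y → Spec_min_time_to_copy n x y (min_time_to_copy n x y)

-- ===== LEMMAS AND PROOFS =====

-- basic bracket facts about Python floor division with a positive divisor
theorem pvFd_bounds (a x : Int) (hx : 0 < x) :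
    PySem.Int.floordiv a x * x ≤ a ∧ a < PySem.Int.floordiv a x * x + x := by
  have h := PySem.Int.floordiv_mul_add_mod a x
  have h1 := PySem.Int.mod_nonneg a hx
  have h2 := PySem.Int.mod_lt a hx
  constructor <;> linarith

theorem pvFd_mono {a b : Int} (x : Int) (hx : 0 < x) (h : a ≤ b) :
    PySem.Int.floordiv a x ≤ PySem.Int.floordiv b x := by
  rw [PySem.Int.le_floordiv_iff_mul_le hx]
  have := (pvFd_bounds a x hx).1
  linarith

-- the predicate A binary-searches over
def pvP (n x y t : Int) : Prop :=
  n ≤ PySem.Int.floordiv t x + PySem.Int.floordiv t y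

theorem pvP_mono {n x y t s : Int} (hx : 0 < x) (hy : 0 < y) (hts : t ≤ s)
    (h : pvP n x y t) : pvP n x y s := by
  have h1 := pvFd_mono x hx hts
  have h2 := pvFd_mono y hy hts
  unfold pvP at *
  linarith

-- any feasible split (a copies on x, n - a on y) satisfies the predicate at its cost
theorem pvP_of_split {n x y a : Int} (hx : 0 < x) (hy : 0 < y)
    (t : Int) (h1 : a * x ≤ t) (h2 : (n - a) * y ≤ t) : pvP n x y t := by
  have hA : a ≤ PySem.Int.floordiv t x := (PySem.Int.le_floordiv_iff_mul_le hx).2 h1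
  have hB : n - a ≤ PySem.Int.floordiv t y := (PySem.Int.le_floordiv_iff_mul_le hy).2 h2
  unfold pvP
  linarith

-- A's loop pinned to the unique minimum c of the (monotone) predicate
theorem pvBsearch_exact (n x y : Int) (hx : 0 < x) (hy : 0 < y) (c : Int)
    (hc : pvP n x y c) (hmin : ∀ t, pvP n x y t → c ≤ t) :
    ∀ (fuel : Nat) (l r : Int), (r - l).toNat ≤ fuel → l ≤ c → c ≤ r →
      bsearchLoop n x y fuel l r = c := by
  intro fuel
  induction fuel with
  | zero =>
    intro l r hf hlc hcr
    rw [bsearchLoop]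
    omega
  | succ fuel ih =>
    intro l r hf hlc hcr
    rw [bsearchLoop]
    by_cases h : l < r
    · rw [if_pos h]
      have hmid : l ≤ PySem.Int.floordiv (l + r) 2 ∧ PySem.Int.floordiv (l + r) 2 < r := by
        rw [PySem.Int.floordiv_eq_ediv_of_pos (show (0:Int) < 2 by norm_num)]
        omega
      set mid := PySem.Int.floordiv (l + r) 2 with hm
      by_cases hp : is_possible n x y mid = true
      · rw [if_pos hp]
        refine ih l mid (by omega) hlc ?_
        exact hmin mid (by simpa [is_possible, ge_iff_le, pvP] using hp)
      · rw [if_neg hp]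
        refine ih (mid + 1) r (by omega) ?_ hcr
        -- mid < c since pvP fails at mid
        by_contra hcm
        push Not at hcm
        have : pvP n x y mid := pvP_mono hx hy (by omega) hc
        exact hp (by simpa [is_possible, ge_iff_le, pvP] using this)
    · rw [if_neg h]
      omega

-- the closed-form candidate of B is the minimum of the predicate
theorem pvAlt_exact (n x y : Int) (hn : 0 < n) (hx : 0 < x) (hy : 0 < y) :
    let a := PySem.Int.floordiv (n * y) (x + y)
    let best := min (max (a * x) ((n - a) * y)) (max ((a + 1) * x) ((n - a - 1) * y))
    pvP n x y best ∧ (∀ t, pvP n x y t → best ≤ t) ∧ 0 ≤ best := by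
  intro a best
  have hxy : 0 < x + y := by linarith
  have ha0 : 0 ≤ a := by
    show (0:Int) ≤ PySem.Int.floordiv (n * y) (x + y)
    exact (PySem.Int.le_floordiv_iff_mul_le hxy).2 (by nlinarith)
  have hab := pvFd_bounds (n * y) (x + y) hxy
  -- a*(x+y) ≤ n*y < (a+1)*(x+y)
  have hL : a * (x + y) ≤ n * y := hab.1
  have hR : n * y < a * (x + y) + (x + y) := hab.2
  have haN : a ≤ n - 1 := by nlinarith
  constructor
  · -- both candidates satisfy the predicate, hence so does their min
    rcases min_cases (max (a * x) ((n - a) * y)) (max ((a + 1) * x) ((n - a - 1) * y)) with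
      ⟨he, _⟩ | ⟨he, _⟩
    · rw [show best = _ from he]
      exact pvP_of_split hx hy _ (le_max_left _ _) (le_max_right _ _)
    · rw [show best = _ from he]
      refine pvP_of_split hx hy (a := a + 1) _ (le_max_left _ _) ?_
      have he2 : n - (a + 1) = n - a - 1 := by ring
      rw [he2]
      exact le_max_right _ _
  constructor
  · intro t ht
    -- t ≥ 0, since pvP fails for negative t
    have ht0 : 0 ≤ t := by
      by_contra h0
      push Not at h0
      have h1 : PySem.Int.floordiv t x ≤ PySem.Int.floordiv (-1) x := pvFd_mono x hx (by omega)
      have h2 : PySem.Int.floordiv t y ≤ PySem.Int.floordiv (-1) y := pvFd_mono y hy (by omega)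
      have h3 : PySem.Int.floordiv (-1) x ≤ -1 := by
        have := (pvFd_bounds (-1) x hx)
        nlinarith [this.1, this.2]
      have h4 : PySem.Int.floordiv (-1) y ≤ -1 := by
        have := (pvFd_bounds (-1) y hy)
        nlinarith [this.1, this.2]
      unfold pvP at ht
      linarith
    -- the split induced by t
    set a' := PySem.Int.floordiv t x with ha'
    have ha'0 : 0 ≤ a' := by
      rw [ha']
      exact (PySem.Int.le_floordiv_iff_mul_le hx).2 (by simpa using ht0)
    have hax : a' * x ≤ t := (pvFd_bounds t x hx).1
    have hby : (n - a') * y ≤ t := by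
      have hb := (pvFd_bounds t y hy).1
      have : n - a' ≤ PySem.Int.floordiv t y := by unfold pvP at ht; omega
      nlinarith
    -- compare min(a', n) with a
    by_cases hk : min a' n ≤ a
    · -- k ≤ a : cost ≥ (n-a)*y = first candidate (there a*x ≤ (n-a)*y)
      have hkx : (n - min a' n) * y ≤ t := by
        rcases le_total a' n with h | h
        · simpa [min_eq_left h] using hby
        · simp only [min_eq_right h]
          nlinarith
      have h1 : a * x ≤ (n - a) * y := by nlinarith
      have h2 : (n - a) * y ≤ (n - min a' n) * y := by
        have : n - a ≤ n - min a' n := by omega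
        nlinarith
      calc best ≤ max (a * x) ((n - a) * y) := min_le_left _ _
        _ = (n - a) * y := max_eq_right h1
        _ ≤ t := le_trans h2 hkx
    · -- a + 1 ≤ k ≤ a' : cost ≥ (a+1)*x = second candidate
      have hk' : a + 1 ≤ a' := by omega
      have h1 : (n - a - 1) * y ≤ (a + 1) * x := by nlinarith
      have h2 : (a + 1) * x ≤ a' * x := by nlinarith
      calc best ≤ max ((a + 1) * x) ((n - a - 1) * y) := min_le_right _ _
        _ = (a + 1) * x := max_eq_left h1
        _ ≤ t := le_trans h2 hax
  · -- 0 ≤ best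
    have h1 : 0 ≤ a * x := mul_nonneg ha0 (le_of_lt hx)
    have h2 : 0 ≤ (a + 1) * x := mul_nonneg (by omega) (le_of_lt hx)
    rw [le_min_iff]
    exact ⟨le_trans h1 (le_max_left _ _), le_trans h2 (le_max_left _ _)⟩

-- ===== VERDICT (by name: the statement is the Claim_ definition above) =====
theorem min_time_to_copy_spec : Claim_equal_min_time_to_copy := by
  intro n x y _ hPre
  unfold Spec_min_time_to_copy min_time_to_copy min_time_to_copy_alt
  by_cases hr : n * min x y ≤ 0
  · -- right ≤ 0 : A's loop does not run, both return 0
    have h0 : (n * min x y).toNat = 0 := by omega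
    rw [if_pos hr, h0, bsearchLoop]
  · rw [if_neg hr]
    have hr : 0 < n * min x y := by omega
    -- within Pre_, a positive right forces 0 < n, 0 < x, 0 < y
    have hpos : 0 < n ∧ 0 < x ∧ 0 < y := by
      rcases hPre with hn | ⟨hx, hy⟩
      · have hm : 0 < min x y := by
          by_contra h
          push Not at h
          nlinarith
        have : 0 < n := by
          by_contra h
          push Not at h
          nlinarith
        exact ⟨this, lt_of_lt_of_le hm (min_le_left _ _), lt_of_lt_of_le hm (min_le_right _ _)⟩
      · have hm : 0 ≤ min x y := le_min hx hy
        have hn : 0 < n := by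
          by_contra h
          push Not at h
          nlinarith
        have hmp : 0 < min x y := by
          by_contra h
          push Not at h
          have : min x y = 0 := le_antisymm h hm
          rw [this] at hr
          simp at hr
        exact ⟨hn, lt_of_lt_of_le hmp (min_le_left _ _), lt_of_lt_of_le hmp (min_le_right _ _)⟩
    obtain ⟨hn, hx, hy⟩ := hpos
    obtain ⟨hbP, hbMin, hb0⟩ := pvAlt_exact n x y hn hx hy
    refine pvBsearch_exact n x y hx hy _ hbP hbMin (n * min x y).toNat 0 (n * min x y)
      (by omega) hb0 ?_
    -- the predicate holds at t = n * min x y, hence best ≤ n * min x y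
    refine hbMin _ ?_
    rcases le_total x y with h | h
    · rw [min_eq_left h]
      exact pvP_of_split hx hy (a := n) _ (by nlinarith) (by nlinarith)
    · rw [min_eq_right h]
      exact pvP_of_split hx hy (a := 0) _ (by nlinarith) (by nlinarith)
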